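-- pv_equiv track=rewrite | github.com/enigma/aoc | python/2025/3.py | max_jolt
-- ===== SOURCE A (Python) =====
-- from functools import cache
--
-- def max_jolt(bank, size):
--     @cache
--     def _max_jolt(start, size):
--         result = cur = None
--         for i in range(start, len(bank) - size + 1):
--             if cur is None or bank[i] > cur:
--                 if size == 1:
--                     result = cur = bank[i]
--                 elif (candidate := _max_jolt(i + 1, size - 1)) is not None:
--                     cur = bank[i]
--                     result = cur * (10 ** (size - 1)) + candidate
--         return result
--
--     return _max_jolt(0, size)
-- ===== SOURCE B (Python) =====
-- def max_jolt(bank, size):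
--     n = len(bank)
--     if size > n:
--         return None
--     result = 0
--     start = 0
--     for remaining in range(size, 0, -1):
--         j = start
--         for i in range(start + 1, n - remaining + 1):
--             if bank[i] > bank[j]:
--                 j = i
--         result = result * 10 + bank[j]
--         start = j + 1
--     return result
-- ===== Notes on version B (the rewrite author's own statement) =====
-- stated objective: faster
-- what changed: Replaces A's memoized recursion over all (start, size) states (each re-scanning its window and computing candidate values for every running-maximum improvement) by a direct iterative greedy selection: for each of the size output positions pick the first maximum of the feasible window and advance, accumulating the number on the fly (O(n*size) vs O(n^2*size); a timing run measured B hundreds of times faster at n=256, with A timing out at n>=1024).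
-- crash fix: For size < 1 A recurses with no base case and raises RecursionError; B returns 0, the value of the empty selection. — e.g. on max_jolt([], 0): A raises RecursionError, B returns some 0
import Mathlib
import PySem

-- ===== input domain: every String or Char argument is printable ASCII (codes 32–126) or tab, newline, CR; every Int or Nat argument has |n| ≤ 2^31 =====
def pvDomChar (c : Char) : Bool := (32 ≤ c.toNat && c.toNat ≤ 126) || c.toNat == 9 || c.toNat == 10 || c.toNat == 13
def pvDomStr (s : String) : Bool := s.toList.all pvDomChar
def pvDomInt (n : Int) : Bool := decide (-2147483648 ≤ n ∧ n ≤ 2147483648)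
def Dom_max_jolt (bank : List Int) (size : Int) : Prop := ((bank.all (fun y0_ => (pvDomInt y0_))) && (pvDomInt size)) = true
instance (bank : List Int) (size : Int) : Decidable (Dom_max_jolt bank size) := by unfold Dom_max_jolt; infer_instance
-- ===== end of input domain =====

-- B replaces A's memoized recursion over (start, size) by a direct iterative greedy selection
-- (pick the first maximum of each feasible window), dropping the cache and the per-state inner
-- scans; objective: faster (a timing run measured B hundreds of times faster at n=256).

-- ===== PORT A =====
-- Inner recursion `_max_jolt(start, size)`; the Nat argument is the (positive) `size`.
-- The `0` fuel case is unreachable under Pre_ (Python recurses without a base case for size < 1).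
-- Indices read inside the loop are always in range when reached, so `pyGetD _ _ 0`'s default is never used.
def maxJoltAux (bank : List Int) : Nat → Int → Option Int
  | 0, _ => none
  | s+1, start =>
    ((PySem.List.pyRange start ((bank.length : Int) - (s+1) + 1) 1).foldl
      (fun (st : Option Int × Option Int) i =>
        let bi := PySem.List.pyGetD bank i 0
        if (match st.2 with | none => true | some c => decide (c < bi)) then
          if s = 0 then (some bi, some bi)
          else
            match maxJoltAux bank s (i + 1) with
            | none => st
            | some cand => (some (bi * 10 ^ s + cand), some bi)
        else st)
      (none, none)).1

def max_jolt (bank : List Int) (size : Int) : Option Int :=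
  if size < 1 then none  -- totality guard: Python's recursion does not terminate for size < 1 (outside Pre_)
  else maxJoltAux bank size.toNat 0

-- ===== PORT B =====
def max_jolt_alt (bank : List Int) (size : Int) : Option Int :=
  let n : Int := bank.length
  if size > n then none
  else
    some (((PySem.List.pyRange size 0 (-1)).foldl
      (fun (st : Int × Int) remaining =>
        let start := st.2
        let j := (PySem.List.pyRange (start + 1) (n - remaining + 1) 1).foldl
          (fun j i => if PySem.List.pyGetD bank j 0 < PySem.List.pyGetD bank i 0 then i else j)
          start
        (st.1 * 10 + PySem.List.pyGetD bank j 0, j + 1))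
      (0, 0)).1)

-- ===== PRECONDITION & SPEC =====
-- Pre_ excludes exactly size < 1, where Python's A recurses without a base case and raises RecursionError.
def Pre_max_jolt (bank : List Int) (size : Int) : Prop := 1 ≤ size
instance (bank : List Int) (size : Int) : Decidable (Pre_max_jolt bank size) := by unfold Pre_max_jolt; infer_instance
def pvWitness_max_jolt : List Int × Int := ([3, 1, 2], 2)

-- For size < 1, A recurses forever (RecursionError); B returns 0, the value of the empty selection.
def Raises_max_jolt (bank : List Int) (size : Int) : Prop := size < 1
instance (bank : List Int) (size : Int) : Decidable (Raises_max_jolt bank size) := by unfold Raises_max_jolt; infer_instance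
def pvRaiseWitness_max_jolt : List Int × Int := ([], 0)
def pvRaiseWitnessOut_max_jolt : Option Int := some 0

def Spec_max_jolt (bank : List Int) (size : Int) (out : Option Int) : Prop := out = max_jolt_alt bank size
instance (bank : List Int) (size : Int) (out : Option Int) : Decidable (Spec_max_jolt bank size out) := by unfold Spec_max_jolt; infer_instance

-- ===== CLAIM (what is proved, stated in full; the proofs are below) =====
def Claim_equal_max_jolt : Prop := ∀ (bank : List Int) (size : Int), Dom_max_jolt bank size → Pre_max_jolt bank size → Spec_max_jolt bank size (max_jolt bank size)
def Claim_raises_max_jolt : Prop := (∀ (bank : List Int) (size : Int), Dom_max_jolt bank size → Raises_max_jolt bank size → ¬ Pre_max_jolt bank size) ∧ (Dom_max_jolt (pvRaiseWitness_max_jolt.1) (pvRaiseWitness_max_jolt.2) ∧ Raises_max_jolt (pvRaiseWitness_max_jolt.1) (pvRaiseWitness_max_jolt.2) ∧ max_jolt_alt (pvRaiseWitness_max_jolt.1) (pvRaiseWitness_max_jolt.2) = pvRaiseWitnessOut_max_jolt)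

-- ===== LEMMAS AND PROOFS =====

-- digit at index j (both ports read it this way)
def pvG (bank : List Int) (j : Int) : Int := PySem.List.pyGetD bank j 0

-- B's inner-loop step (first-argmax choice)
def pvStep (bank : List Int) : Int → Int → Int :=
  fun j i => if pvG bank j < pvG bank i then i else j

-- first argmax of bank over the window [start, hi)
def pvArg (bank : List Int) (start hi : Int) : Int :=
  (PySem.List.pyRange (start + 1) hi 1).foldl (pvStep bank) start

-- A's loop body, named
def pvAstep (bank : List Int) (s : Nat) : (Option Int × Option Int) → Int → (Option Int × Option Int) :=
  fun st i =>
    let bi := PySem.List.pyGetD bank i 0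
    if (match st.2 with | none => true | some c => decide (c < bi)) then
      if s = 0 then (some bi, some bi)
      else
        match maxJoltAux bank s (i + 1) with
        | none => st
        | some cand => (some (bi * 10 ^ s + cand), some bi)
    else st

-- B's outer-loop step, named
def pvBstep (bank : List Int) : (Int × Int) → Int → (Int × Int) :=
  fun st remaining =>
    let j := (PySem.List.pyRange (st.2 + 1) ((bank.length : Int) - remaining + 1) 1).foldl
      (pvStep bank) st.2
    (st.1 * 10 + pvG bank j, j + 1)

-- the value A's loop stores when index j is the chosen (first-argmax) index
def pvVal (bank : List Int) (s : Nat) (j : Int) : Option Int :=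
  if s = 0 then some (pvG bank j)
  else (maxJoltAux bank s (j + 1)).map (fun c => pvG bank j * 10 ^ s + c)

theorem maxJoltAux_eq (bank : List Int) (s : Nat) (start : Int) :
    maxJoltAux bank (s + 1) start =
      ((PySem.List.pyRange start ((bank.length : Int) - (s + 1) + 1) 1).foldl
        (pvAstep bank s) (none, none)).1 := rfl

theorem pvFold_inv (bank : List Int) (P : Int → Prop) :
    ∀ (l : List Int) (j0 : Int), P j0 → (∀ i ∈ l, P i) → P (l.foldl (pvStep bank) j0)
  | [], j0, h0, _ => h0
  | i :: l, j0, h0, hl => by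
      simp only [List.foldl_cons]
      refine pvFold_inv bank P l _ ?_ (fun x hx => hl x (by simp [hx]))
      unfold pvStep
      split
      · exact hl i (by simp)
      · exact h0

theorem pvArg_bounds (bank : List Int) (start hi : Int) (h : start < hi) :
    start ≤ pvArg bank start hi ∧ pvArg bank start hi < hi := by
  unfold pvArg
  refine pvFold_inv bank (fun j => start ≤ j ∧ j < hi) _ start ⟨le_refl _, h⟩ ?_
  intro i hi'
  rw [PySem.List.mem_pyRange_one] at hi'
  omega

theorem pvArg_last (bank : List Int) (start hi : Int) (h : start < hi) :
    pvArg bank start (hi + 1) = pvStep bank (pvArg bank start hi) hi := by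
  unfold pvArg
  rw [PySem.List.pyRange_one_succ_right (by omega), List.foldl_append]
  rfl

-- A's loop over a window [start, start+k+1] ⊆ [start, n-s) chooses the first argmax,
-- provided the recursive calls it makes all return a value
theorem pvLoopL (bank : List Int) (s : Nat)
    (HS : ∀ t : Int, t ≤ (bank.length : Int) - s → s = 0 ∨ (maxJoltAux bank s t).isSome) :
    ∀ (k : Nat) (start : Int), start + (k : Int) + 1 ≤ (bank.length : Int) - s →
      (PySem.List.pyRange start (start + (k : Int) + 1) 1).foldl (pvAstep bank s) (none, none)
        = (pvVal bank s (pvArg bank start (start + (k : Int) + 1)),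
           some (pvG bank (pvArg bank start (start + (k : Int) + 1)))) := by
  intro k
  induction k with
  | zero =>
    intro start h
    rw [show start + ((0:Nat):Int) + 1 = start + 1 by norm_num] at h ⊢
    have ha : pvArg bank start (start + 1) = start := by
      unfold pvArg
      rw [PySem.List.pyRange_one_eq_nil (by omega)]
      rfl
    rw [PySem.List.pyRange_one_singleton, ha]
    simp only [List.foldl_cons, List.foldl_nil]
    match s, HS with
    | 0, _ => simp [pvAstep, pvVal, pvG]
    | s'+1, HS =>
      obtain ⟨c, hc⟩ := Option.isSome_iff_exists.mp ((HS (start + 1) (by omega)).resolve_left (by omega))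
      simp [pvAstep, pvVal, pvG, hc]
  | succ k ih =>
    intro start h
    rw [show start + ((k+1:Nat):Int) + 1 = (start + (k:Int) + 1) + 1 by push_cast; ring] at h ⊢
    rw [PySem.List.pyRange_one_succ_right (by omega), List.foldl_append,
        ih start (by omega)]
    rw [pvArg_last bank start (start + (k:Int) + 1) (by omega)]
    set j' := pvArg bank start (start + (k:Int) + 1) with hj'
    obtain ⟨hb1, hb2⟩ := pvArg_bounds bank start (start + (k:Int) + 1) (by omega)
    rw [← hj'] at hb1 hb2
    simp only [List.foldl_cons, List.foldl_nil]
    by_cases hlt : pvG bank j' < pvG bank (start + (k:Int) + 1)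
    · rw [show pvStep bank j' (start + (k:Int) + 1) = start + (k:Int) + 1 by
        unfold pvStep; rw [if_pos hlt]]
      unfold pvG at hlt
      match s, HS with
      | 0, _ =>
        simp [pvAstep, pvVal, pvG, hlt]
      | s'+1, HS =>
        obtain ⟨c, hc⟩ := Option.isSome_iff_exists.mp
          ((HS (start + (k:Int) + 1 + 1) (by omega)).resolve_left (by omega))
        simp [pvAstep, pvVal, pvG, hlt, hc]
    · rw [show pvStep bank j' (start + (k:Int) + 1) = j' by
        unfold pvStep; rw [if_neg hlt]]
      unfold pvG at hlt
      simp [pvAstep, pvG]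
      exact fun hcon => absurd hcon hlt

theorem pvWindow (bank : List Int) (s : Nat)
    (HS : ∀ t : Int, t ≤ (bank.length : Int) - s → s = 0 ∨ (maxJoltAux bank s t).isSome)
    (start : Int) (h : start ≤ (bank.length : Int) - (s + 1)) :
    maxJoltAux bank (s + 1) start = pvVal bank s (pvArg bank start ((bank.length : Int) - s)) := by
  have hk : (((bank.length : Int) - s - start - 1).toNat : Int)
      = (bank.length : Int) - s - start - 1 := Int.toNat_of_nonneg (by omega)
  have hb : (bank.length : Int) - (s + 1) + 1
      = start + (((bank.length : Int) - s - start - 1).toNat : Int) + 1 := by omega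
  have hb2 : (bank.length : Int) - s
      = start + (((bank.length : Int) - s - start - 1).toNat : Int) + 1 := by omega
  rw [maxJoltAux_eq, hb, pvLoopL bank s HS _ start (by omega), ← hb2]

theorem maxJoltAux_isSome (bank : List Int) (s : Nat) (start : Int)
    (h : start ≤ (bank.length : Int) - (s + 1)) :
    (maxJoltAux bank (s + 1) start).isSome := by
  induction s generalizing start with
  | zero =>
    rw [pvWindow bank 0 (fun t _ => Or.inl rfl) start h]
    simp [pvVal]
  | succ s ih =>
    have HS : ∀ t : Int, t ≤ (bank.length : Int) - (s+1) → (s+1) = 0 ∨ (maxJoltAux bank (s+1) t).isSome :=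
      fun t ht => Or.inr (ih t (by omega))
    rw [pvWindow bank (s+1) HS start h]
    obtain ⟨hb1, hb2⟩ := pvArg_bounds bank start ((bank.length : Int) - ((s:Int)+1))
      (by push_cast at h ⊢; omega)
    unfold pvVal
    rw [if_neg (by omega)]
    rw [show ((bank.length : Int) - ((s+1:Nat):Int)) = (bank.length : Int) - ((s:Int)+1) by push_cast; ring] at *
    simp only [Option.isSome_map]
    exact ih _ (by push_cast at h hb1 hb2 ⊢; omega)

theorem pvHS (bank : List Int) (s : Nat) :
    ∀ t : Int, t ≤ (bank.length : Int) - s → s = 0 ∨ (maxJoltAux bank s t).isSome := by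
  match s with
  | 0 => exact fun t _ => Or.inl rfl
  | s'+1 => exact fun t ht => Or.inr (maxJoltAux_isSome bank s' t (by push_cast at ht ⊢; omega))

theorem maxJoltAux_some (bank : List Int) (s : Nat) (start : Int)
    (h : start ≤ (bank.length : Int) - (s + 1)) :
    maxJoltAux bank (s + 1) start = pvVal bank s (pvArg bank start ((bank.length : Int) - s)) :=
  pvWindow bank s (pvHS bank s) start h

theorem maxJoltAux_empty (bank : List Int) (s : Nat) (start : Int)
    (h : (bank.length : Int) - (s + 1) < start) :
    maxJoltAux bank (s + 1) start = none := by
  rw [maxJoltAux_eq, PySem.List.pyRange_one_eq_nil (by omega)]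
  rfl

-- main: B's outer fold accumulates exactly A's recursive value
theorem pvMain (bank : List Int) (s : Nat) :
    ∀ (start r0 : Int), start ≤ (bank.length : Int) - (s + 1) →
    ((PySem.List.pyRange ((s : Int) + 1) 0 (-1)).foldl (pvBstep bank) (r0, start)).1
      = r0 * 10 ^ (s + 1) + (maxJoltAux bank (s + 1) start).getD 0 := by
  induction s with
  | zero =>
    intro start r0 h
    rw [show (((0:Nat):Int) + 1) = (1:Int) by norm_num,
        PySem.List.pyRange_neg_one_cons (by omega),
        show (1:Int) - 1 = 0 by norm_num,
        PySem.List.pyRange_neg_one_eq_nil (by omega)]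
    simp only [List.foldl_cons, List.foldl_nil]
    rw [maxJoltAux_some bank 0 start (by omega)]
    unfold pvBstep pvVal pvArg
    norm_num
  | succ s ih =>
    intro start r0 h
    rw [PySem.List.pyRange_neg_one_cons (by push_cast; omega)]
    simp only [List.foldl_cons]
    have hw : (bank.length : Int) - (((s+1:Nat):Int) + 1) + 1 = (bank.length : Int) - ((s:Int) + 1) := by
      push_cast; ring
    have hstep : pvBstep bank (r0, start) (((s+1:Nat):Int) + 1)
        = (r0 * 10 + pvG bank (pvArg bank start ((bank.length : Int) - ((s:Int) + 1))),
           pvArg bank start ((bank.length : Int) - ((s:Int) + 1)) + 1) := by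
      unfold pvBstep pvArg
      rw [hw]
    rw [hstep, show (((s+1:Nat):Int) + 1 - 1) = ((s:Nat):Int) + 1 by push_cast; ring]
    set j := pvArg bank start ((bank.length : Int) - ((s:Int) + 1)) with hj
    obtain ⟨hj1, hj2⟩ := pvArg_bounds bank start ((bank.length : Int) - ((s:Int) + 1)) (by push_cast at h; omega)
    rw [← hj] at hj1 hj2
    rw [ih _ _ (by omega)]
    have hA2 : maxJoltAux bank (s + 1 + 1) start
        = pvVal bank (s+1) j := by
      rw [hj]
      rw [maxJoltAux_some bank (s+1) start (by push_cast at h ⊢; omega)]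
      congr 2
    rw [hA2]
    obtain ⟨c, hc⟩ := Option.isSome_iff_exists.mp
      (maxJoltAux_isSome bank s (j + 1) (by omega))
    unfold pvVal
    rw [if_neg (by omega), hc]
    simp only [Option.map_some, Option.getD_some]
    ring

theorem max_jolt_alt_of_le (bank : List Int) (size : Int) (h : size ≤ (bank.length : Int)) :
    max_jolt_alt bank size
      = some (((PySem.List.pyRange size 0 (-1)).foldl (pvBstep bank) (0, 0)).1) := by
  unfold max_jolt_alt pvBstep pvStep pvG
  rw [if_neg (by omega)]

-- ===== VERDICT (by name: the statement is the Claim_ definition above) =====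
theorem max_jolt_spec : Claim_equal_max_jolt := by
  intro bank size _ hpre
  unfold Spec_max_jolt
  unfold Pre_max_jolt at hpre
  obtain ⟨s, rfl⟩ : ∃ s : Nat, size = (s : Int) + 1 := ⟨(size - 1).toNat, by omega⟩
  have hA : max_jolt bank ((s : Int) + 1) = maxJoltAux bank (s + 1) 0 := by
    unfold max_jolt
    rw [if_neg (by omega)]
    congr 1
  by_cases hn : (s : Int) + 1 ≤ (bank.length : Int)
  · rw [hA, max_jolt_alt_of_le bank _ hn]
    rw [pvMain bank s 0 0 (by omega)]
    obtain ⟨v, hv⟩ := Option.isSome_iff_exists.mp (maxJoltAux_isSome bank s 0 (by omega))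
    rw [hv]
    simp
  · rw [hA, maxJoltAux_empty bank s 0 (by omega)]
    unfold max_jolt_alt
    rw [if_pos (by omega)]

@[simp]
theorem max_jolt_raises : Claim_raises_max_jolt := by
  unfold Claim_raises_max_jolt
  exact ⟨fun bank size _ hr hp => by simp [Raises_max_jolt] at hr; simp [Pre_max_jolt] at hp; omega,
         by decide⟩
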